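-- pv_equiv track=rewrite | github.com/NobodyFiancee/Tinkoff | АиСД Тинькофф 2024 (100 из 100)/Экзамен/D.py | count_triprime_numbers
-- ===== SOURCE A (Python) =====
-- MOD = 10 ** 9 + 9
--
-- def generate_three_digit_primes():
--     sieve = [True] * 1000
--     sieve[0] = sieve[1] = False
--     for start in range(2, int(len(sieve) ** 0.5) + 1):
--         if sieve[start]:
--             for multiple in range(start * start, len(sieve), start):
--                 sieve[multiple] = False
--     primes = [num for num in range(100, 1000) if sieve[num]]
--     return primes
--
-- def count_triprime_numbers(N):
--     primes = generate_three_digit_primes()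
--     prime_set = set(primes)
--
--     dp = [0] * 1000
--     for prime in primes:
--         dp[prime] = 1
--
--     for _ in range(3, N):
--         new_dp = [0] * 1000
--         for num in range(100, 1000):
--             if dp[num] > 0:
--                 for digit in range(10):
--                     new_num = (num % 100) * 10 + digit
--                     if new_num in prime_set:
--                         new_dp[new_num] = (new_dp[new_num] + dp[num]) % MOD
--         dp = new_dp
--
--     result = sum(dp) % MOD
--     return result
-- ===== SOURCE B (Python) =====
-- MOD = 10 ** 9 + 9
--
-- def count_triprime_numbers(N):
--     # Matrix exponentiation: transition matrix over the three-digit primes,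
--     # raised to the (N-3)rd power by repeated squaring; answer = sum of all entries.
--     primes = [n for n in range(100, 1000) if all(n % d for d in range(2, 32))]
--     S = len(primes)
--
--     def matmul(X, Y):
--         res = []
--         for row in X:
--             acc = [0] * len(Y[0])
--             for x, yrow in zip(row, Y):
--                 acc = [a + x * b for a, b in zip(acc, yrow)]
--             res.append([a % MOD for a in acc])
--         return res
--
--     M = [[1 if q // 10 == p % 100 else 0 for q in primes] for p in primes]
--     R = [[1 if i == j else 0 for j in range(S)] for i in range(S)]
--     e = N - 3
--     while e > 0:
--         if e % 2 == 1:
--             R = matmul(R, M)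
--         M = matmul(M, M)
--         e //= 2
--     return sum(map(sum, R)) % MOD
-- ===== Notes on version B (the rewrite author's own statement) =====
-- stated objective: alternative
-- what changed: B replaces A's N-3 sweeps of the array DP by binary exponentiation of the 143x143 transition matrix over the three-digit primes (primes by trial division instead of a sieve) and sums the entries of the matrix power; asymptotically O(S^3 log N) vs O(N*E), but the large constant makes it slower at the probe's sizes.
import Mathlib
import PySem

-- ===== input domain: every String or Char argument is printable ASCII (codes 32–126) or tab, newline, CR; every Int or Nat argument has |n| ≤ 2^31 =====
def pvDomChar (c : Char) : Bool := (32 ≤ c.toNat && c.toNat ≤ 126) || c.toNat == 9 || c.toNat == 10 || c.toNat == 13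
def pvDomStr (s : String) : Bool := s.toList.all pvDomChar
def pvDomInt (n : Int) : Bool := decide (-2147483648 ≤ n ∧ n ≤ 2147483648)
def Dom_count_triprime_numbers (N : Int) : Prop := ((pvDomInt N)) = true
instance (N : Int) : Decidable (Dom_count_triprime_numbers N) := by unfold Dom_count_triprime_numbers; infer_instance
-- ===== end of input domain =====

-- B replaces A's step-by-step DP (N-3 sweeps over a thousand-slot array) by binary exponentiation of
-- the transition matrix over the 143 three-digit primes and sums the entries of the power; same results.

-- ===== PORT A =====
def pvMOD : Int := 10 ^ 9 + 9

-- Python list indexing / assignment on the dense integer tables, as Lean arrays;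
-- exact for nonnegative in-range indices (the only ones these programs use)
def pvArrGet {α : Type} (xs : Array α) (i : Int) (d : α) : α := xs.getD i.toNat d
def pvArrSet {α : Type} (xs : Array α) (i : Int) (v : α) : Array α := xs.setIfInBounds i.toNat v

def generate_three_digit_primes : List Int :=
  let sieve : Array Bool := Array.replicate 1000 true
  let sieve := pvArrSet sieve 0 false      -- sieve[0] = sieve[1] = False
  let sieve := pvArrSet sieve 1 false
  -- int(len(sieve) ** 0.5) + 1 = int(1000 ** 0.5) + 1 = 32 (the only float, a constant; exact)
  let sieve := (PySem.List.pyRange 2 32 1).foldl (fun sv start =>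
    if pvArrGet sv start false then
      (PySem.List.pyRange (start * start) 1000 start).foldl
        (fun sv m => pvArrSet sv m false) sv
    else sv) sieve
  (PySem.List.pyRange 100 1000 1).filter (fun num => pvArrGet sieve num false)

def count_triprime_numbers (N : Int) : Int :=
  let primes := generate_three_digit_primes
  let prime_set : PySem.Set Int := PySem.Set.ofList primes
  let dp : Array Int := primes.foldl (fun dp p => pvArrSet dp p 1)
    (Array.replicate 1000 (0 : Int))
  let dp := (PySem.List.pyRange 3 N 1).foldl (fun dp _ =>
    (PySem.List.pyRange 100 1000 1).foldl (fun new_dp num =>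
      if pvArrGet dp num 0 > 0 then
        (PySem.List.pyRange 0 10 1).foldl (fun new_dp digit =>
          let new_num := PySem.Int.mod num 100 * 10 + digit
          if PySem.Set.contains prime_set new_num then
            pvArrSet new_dp new_num
              (PySem.Int.mod (pvArrGet new_dp new_num 0 + pvArrGet dp num 0) pvMOD)
          else new_dp) new_dp
      else new_dp) (Array.replicate 1000 (0 : Int))) dp
  PySem.Int.mod (dp.foldl (· + ·) 0) pvMOD

-- ===== PORT B =====
def pvIsPrime (n : Int) : Bool :=
  -- all(n % d for d in range(2, 32))
  (PySem.List.pyRange 2 32 1).all (fun d => !(PySem.Int.mod n d == 0))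

def pvPrimesB : List Int := (PySem.List.pyRange 100 1000 1).filter pvIsPrime

-- matmul(X, Y): acc = [0]*len(Y[0]); for x, yrow in zip(row, Y): acc = [a + x*b ...]; [a % MOD ...]
def pvMatmul (X Y : List (List Int)) : List (List Int) :=
  X.map (fun row =>
    ((row.zip Y).foldl (fun acc xy =>
        (acc.zip xy.2).map (fun ab => ab.1 + xy.1 * ab.2))
      (List.replicate (Y.headD []).length (0 : Int))).map
      (fun a => PySem.Int.mod a pvMOD))

-- while e > 0: if e % 2 == 1: R = matmul(R, M); M = matmul(M, M); e //= 2
def pvMatpowLoop (R M : List (List Int)) (e : Int) : List (List Int) :=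
  if 0 < e then
    pvMatpowLoop (if PySem.Int.mod e 2 == 1 then pvMatmul R M else R)
      (pvMatmul M M) (PySem.Int.floordiv e 2)
  else R
termination_by e.toNat
decreasing_by
  show (PySem.Int.floordiv e 2).toNat < e.toNat
  have h2 : PySem.Int.floordiv e 2 = e / 2 := by
    show Int.fdiv e 2 = e / 2
    rw [Int.fdiv_eq_ediv]; simp
  omega

def count_triprime_numbers_alt (N : Int) : Int :=
  let primes := pvPrimesB
  let M := primes.map (fun p => primes.map (fun q =>
    if PySem.Int.floordiv q 10 == PySem.Int.mod p 100 then (1 : Int) else 0))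
  let R := (List.range primes.length).map (fun i => (List.range primes.length).map
    (fun j => if i = j then (1 : Int) else 0))
  let P := pvMatpowLoop R M (N - 3)
  PySem.Int.mod ((P.map List.sum).sum) pvMOD

-- ===== PRECONDITION & SPEC =====
def Spec_count_triprime_numbers (N : Int) (out : Int) : Prop := out = count_triprime_numbers_alt N
instance (N : Int) (out : Int) : Decidable (Spec_count_triprime_numbers N out) := by unfold Spec_count_triprime_numbers; infer_instance

-- ===== CLAIM (what is proved, stated in full; the proofs are below) =====
def Claim_equal_count_triprime_numbers : Prop := ∀ (N : Int), Dom_count_triprime_numbers N → Spec_count_triprime_numbers N (count_triprime_numbers N)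

-- ===== LEMMAS AND PROOFS =====
set_option maxRecDepth 100000
set_option maxHeartbeats 1000000

def pvMODn : Nat := 1000000009

theorem pvMOD_cast : pvMOD = (pvMODn : Int) := by norm_num [pvMOD, pvMODn]

-- cast Int → ZMod pvMODn absorbs Python's % MOD
theorem pv_cast_mod (x : Int) :
    ((PySem.Int.mod x pvMOD : Int) : ZMod pvMODn) = (x : ZMod pvMODn) := by
  have h : PySem.Int.mod x pvMOD = x % ((pvMODn : Nat) : Int) := by
    show Int.fmod x pvMOD = _
    rw [Int.fmod_eq_emod, pvMOD_cast]
    norm_num [pvMODn]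
  rw [h, ZMod.intCast_mod]

theorem pv_mod_eq_of_cast {x y : Int} (h : (x : ZMod pvMODn) = (y : ZMod pvMODn)) :
    PySem.Int.mod x pvMOD = PySem.Int.mod y pvMOD := by
  have he := (ZMod.intCast_eq_intCast_iff' x y pvMODn).mp h
  show Int.fmod x pvMOD = Int.fmod y pvMOD
  rw [Int.fmod_eq_emod, Int.fmod_eq_emod, pvMOD_cast]
  have hpos : (0 : Int) ≤ (pvMODn : Int) := by positivity
  simp [hpos, he]

-- ===== sieve of A computes pvPrimesB (A-side, reused machinery) =====

def pvStartFlags : List Bool := [true, true, false, true, false, true, false, false, false, true,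
  false, true, false, false, false, true, false, true, false, false, false, true, false, false,
  false, false, false, true, false, true]

def pvModel (j : Nat) (i : Int) : Bool :=
  !(i == 0) && !(i == 1) && (List.range j).all (fun t =>
    let k : Int := 2 + t
    !(pvStartFlags.getD t false && decide (k * k ≤ i) && decide (i < 1000) && decide (k ∣ i - k * k)))

theorem pv_model_succ (j : Nat) (i : Int) :
    pvModel (j + 1) i = (pvModel j i &&
      !(pvStartFlags.getD j false && decide ((2 + (j : Int)) * (2 + (j : Int)) ≤ i) &&
        decide (i < 1000) && decide ((2 + (j : Int)) ∣ i - (2 + (j : Int)) * (2 + (j : Int))))) := by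
  simp [pvModel, List.range_succ, Bool.and_assoc]

theorem pv_flag_ok : ∀ j : Nat, j < 30 → pvModel j (2 + (j : Int)) = pvStartFlags.getD j false := by
  decide

theorem pv_nodupPB : pvPrimesB.Nodup := by decide

theorem pv_boundsPB : ∀ p ∈ pvPrimesB, 100 ≤ p ∧ p < 1000 := by decide

theorem pv_len_PB : pvPrimesB.length = 143 := by decide

theorem pv_model_filter : (PySem.List.pyRange 100 1000 1).filter (fun n => pvModel 30 n) = pvPrimesB := by
  decide

theorem pv_pyGetD_pySetD {α : Type} (xs : List α) (m i : Int) (c d : α)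
    (h0 : 0 ≤ m) (hm : m < (xs.length : Int)) (hi : 0 ≤ i) :
    PySem.List.pyGetD (PySem.List.pySetD xs m c) i d = if i = m then c else PySem.List.pyGetD xs i d := by
  rw [PySem.List.pySetD_of_nonneg xs c h0, PySem.List.pyGetD_of_nonneg _ d hi,
    PySem.List.pyGetD_of_nonneg xs d hi]
  by_cases h : i = m
  · subst h
    rw [if_pos rfl]
    have hlt : i.toNat < xs.length := by omega
    simp [List.getD, hlt]
  · rw [if_neg h]
    have hne : i.toNat ≠ m.toNat := by omega
    simp [List.getD, List.getElem?_set_ne (by omega : m.toNat ≠ i.toNat)]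

theorem pv_getD_replicate {α : Type} (n : Nat) (c d : α) (i : Int) (hi : 0 ≤ i) :
    PySem.List.pyGetD (List.replicate n c) i d = if i < (n : Int) then c else d := by
  rw [PySem.List.pyGetD_of_nonneg _ _ hi]
  by_cases h : i < (n : Int)
  · rw [if_pos h, List.getD_replicate _ (by omega)]
  · rw [if_neg h, List.getD_eq_default]
    simp; omega

theorem pv_setfold_length {α : Type} (c : α) : ∀ (us : List Int) (sv : List α),
    (us.foldl (fun sv m => PySem.List.pySetD sv m c) sv).length = sv.length := by
  intro us
  induction us with
  | nil => intro sv; rfl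
  | cons a t ih =>
    intro sv
    simp only [List.foldl_cons]
    rw [ih, PySem.List.length_pySetD]

theorem pv_setfold_get {α : Type} (c d : α) : ∀ (us : List Int) (sv : List α),
    (∀ m ∈ us, 0 ≤ m ∧ m < (sv.length : Int)) → ∀ i : Int, 0 ≤ i →
    PySem.List.pyGetD (us.foldl (fun sv m => PySem.List.pySetD sv m c) sv) i d =
      if i ∈ us then c else PySem.List.pyGetD sv i d := by
  intro us
  induction us with
  | nil => intro sv _ i _; simp
  | cons a t ih =>
    intro sv hm i hi
    have ha := hm a (List.mem_cons_self ..)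
    simp only [List.foldl_cons]
    rw [ih (PySem.List.pySetD sv a c)
      (fun m hmem => by rw [PySem.List.length_pySetD]; exact hm m (List.mem_cons_of_mem _ hmem)) i hi]
    by_cases hit : i ∈ t
    · simp [hit]
    · by_cases hia : i = a
      · subst hia
        simp [hit, pv_pyGetD_pySetD sv i i c d ha.1 ha.2 hi]
      · simp [hit, hia, pv_pyGetD_pySetD sv a i c d ha.1 ha.2 hi]

theorem pv_foldl_filter {α β : Type} (q : α → Bool) (f : β → α → β) : ∀ (l : List α),
    (∀ x ∈ l, q x = false → ∀ acc, f acc x = acc) →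
    ∀ init, l.foldl f init = (l.filter q).foldl f init := by
  intro l
  induction l with
  | nil => intro _ init; rfl
  | cons a t ih =>
    intro h init
    by_cases hq : q a = true
    · rw [List.foldl_cons, List.filter_cons_of_pos hq, List.foldl_cons]
      exact ih (fun x hx => h x (List.mem_cons_of_mem _ hx)) _
    · rw [List.foldl_cons, h a (List.mem_cons_self ..) (by simpa using hq),
        List.filter_cons_of_neg (by simpa using hq)]
      exact ih (fun x hx => h x (List.mem_cons_of_mem _ hx)) _

theorem pv_foldl_rel {α σ τ : Type} (R : σ → τ → Prop) (f : σ → α → σ) (g : τ → α → τ) :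
    ∀ (l : List α), (∀ x ∈ l, ∀ s t, R s t → R (f s x) (g t x)) →
    ∀ s t, R s t → R (l.foldl f s) (l.foldl g t) := by
  intro l
  induction l with
  | nil => intro _ s t hst; exact hst
  | cons a u ih =>
    intro h s t hst
    exact ih (fun x hx => h x (List.mem_cons_of_mem _ hx)) _ _ (h a (List.mem_cons_self ..) _ _ hst)

-- array/list bridges for the Array-based port of A
theorem pv_arr_getD_toList {α : Type} (xs : Array α) (n : Nat) (d : α) :
    xs.getD n d = xs.toList.getD n d := by
  unfold Array.getD List.getD
  split
  · simp [List.getElem?_eq_getElem, *]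
  · rw [List.getElem?_eq_none (by simpa using by omega)]
    rfl

theorem pvArrGet_toList {α : Type} (xs : Array α) (i : Int) (d : α) (h : 0 ≤ i) :
    pvArrGet xs i d = PySem.List.pyGetD xs.toList i d := by
  rw [pvArrGet, pv_arr_getD_toList, PySem.List.pyGetD_of_nonneg _ _ h]

theorem pvArrSet_toList {α : Type} (xs : Array α) (i : Int) (v : α) (h : 0 ≤ i) :
    (pvArrSet xs i v).toList = PySem.List.pySetD xs.toList i v := by
  rw [pvArrSet, Array.toList_setIfInBounds, PySem.List.pySetD_of_nonneg _ _ h]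

theorem pv_fold_sim {α β : Type} (l : List β) (f : Array α → β → Array α) (g : List α → β → List α)
    (h : ∀ b ∈ l, ∀ s : Array α, (f s b).toList = g s.toList b) (s0 : Array α) :
    (l.foldl f s0).toList = l.foldl g s0.toList :=
  pv_foldl_rel (fun (a : Array α) (t : List α) => a.toList = t) f g l
    (fun x hx u t hst => by
      show (f u x).toList = g t x
      rw [h x hx u, (hst : u.toList = t)]) s0 s0.toList rfl

theorem pv_sum_filter {α : Type} (f : α → Int) (q : α → Bool) : ∀ (l : List α),
    (∀ x ∈ l, q x = false → f x = 0) →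
    (l.map f).sum = ((l.filter q).map f).sum := by
  intro l
  induction l with
  | nil => intro _; rfl
  | cons a t ih =>
    intro h
    by_cases hq : q a = true
    · rw [List.filter_cons_of_pos hq]
      simp only [List.map_cons, List.sum_cons]
      rw [ih (fun x hx => h x (List.mem_cons_of_mem _ hx))]
    · rw [List.filter_cons_of_neg (by simpa using hq)]
      simp only [List.map_cons, List.sum_cons]
      rw [h a (List.mem_cons_self ..) (by simpa using hq),
        ih (fun x hx => h x (List.mem_cons_of_mem _ hx))]
      ring

theorem pv_filter_mem_of_sublist : ∀ {l' l : List Int}, l'.Sublist l → l.Nodup →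
    l.filter (fun n => decide (n ∈ l')) = l' := by
  intro l' l hsub
  induction hsub with
  | slnil => intro _; rfl
  | @cons l₁ l₂ a hsub ih =>
    intro hnd
    have hna : a ∉ l₂ := (List.nodup_cons.mp hnd).1
    have : a ∉ l₁ := fun hmem => hna (hsub.subset hmem)
    rw [List.filter_cons_of_neg (by simpa using this)]
    exact ih (List.nodup_cons.mp hnd).2
  | @cons₂ l₁ l₂ a hsub ih =>
    intro hnd
    have hna : a ∉ l₂ := (List.nodup_cons.mp hnd).1
    rw [List.filter_cons_of_pos (by simp)]
    have : l₂.filter (fun n => decide (n ∈ a :: l₁)) = l₂.filter (fun n => decide (n ∈ l₁)) := by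
      apply List.filter_congr
      intro x hx
      have hxa : x ≠ a := fun h => hna (h ▸ hx)
      simp [hxa]
    rw [this, ih (List.nodup_cons.mp hnd).2]

theorem pv_PB_sublist : pvPrimesB.Sublist (PySem.List.pyRange 100 1000 1) := by
  have : pvPrimesB = (PySem.List.pyRange 100 1000 1).filter pvIsPrime := rfl
  rw [this]
  exact List.filter_sublist

theorem pv_filter100 :
    (PySem.List.pyRange 100 1000 1).filter (fun n => decide (n ∈ pvPrimesB)) = pvPrimesB :=
  pv_filter_mem_of_sublist pv_PB_sublist (PySem.List.nodup_pyRange_one 100 1000)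

theorem pv_filter0 :
    (PySem.List.pyRange 0 1000 1).filter (fun n => decide (n ∈ pvPrimesB)) = pvPrimesB := by
  rw [PySem.List.pyRange_one_append 0 100 1000 (by norm_num) (by norm_num), List.filter_append]
  have h1 : (PySem.List.pyRange 0 100 1).filter (fun n => decide (n ∈ pvPrimesB)) = [] := by
    rw [List.filter_eq_nil_iff]
    intro a ha hmem
    have := (PySem.List.mem_pyRange_one.mp ha).2
    have := (pv_boundsPB a (by simpa using hmem)).1
    omega
  rw [h1, pv_filter100, List.nil_append]

theorem pv_inner : ∀ p ∈ pvPrimesB,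
    ((PySem.List.pyRange 0 10 1).map (fun d => PySem.Int.mod p 100 * 10 + d)).filter
        (fun nn => PySem.Set.contains (PySem.Set.ofList pvPrimesB) nn) =
      pvPrimesB.filter (fun q => PySem.Int.floordiv q 10 == PySem.Int.mod p 100) := by
  intro p _
  have hfm : PySem.Int.mod p 100 = p % 100 := by
    show Int.fmod p 100 = p % 100
    rw [Int.fmod_eq_emod]
    simp
  have hr0 : 0 ≤ PySem.Int.mod p 100 := by
    rw [hfm]; exact Int.emod_nonneg p (by norm_num)
  have hr1 : PySem.Int.mod p 100 < 100 := by
    rw [hfm]; exact Int.emod_lt_of_pos p (by norm_num)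
  set r : Int := PySem.Int.mod p 100 with hrdef
  have hmap : (PySem.List.pyRange 0 10 1).map (fun d => r * 10 + d) =
      PySem.List.pyRange (r * 10) (r * 10 + 10) 1 := by
    rw [PySem.List.pyRange_one 0 10, PySem.List.pyRange_one (r * 10) (r * 10 + 10)]
    have h10 : ((10 : Int) - 0).toNat = 10 := rfl
    have h10' : (r * 10 + 10 - r * 10).toNat = 10 := by omega
    rw [h10, h10', List.map_map]
    apply List.map_congr_left
    intro a _
    simp only [Function.comp_apply]
    ring
  rw [hmap]
  have hset : ∀ (l : List Int) , l.filter (fun nn => PySem.Set.contains (PySem.Set.ofList pvPrimesB) nn)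
      = l.filter (fun nn => decide (nn ∈ pvPrimesB)) := by
    intro l
    apply List.filter_congr
    intro x _
    rw [Bool.eq_iff_iff]
    simp only [decide_eq_true_eq]
    rw [show PySem.Set.contains (PySem.Set.ofList pvPrimesB) x = true ↔
        x ∈ PySem.Set.ofList pvPrimesB from by simp [PySem.Set.contains]]
    exact PySem.Set.mem_ofList pvPrimesB x
  rw [hset]
  have hrhs : pvPrimesB.filter (fun q => PySem.Int.floordiv q 10 == r) =
      pvPrimesB.filter (fun q => decide (r * 10 ≤ q ∧ q < r * 10 + 10)) := by
    apply List.filter_congr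
    intro q hq
    have hb := pv_boundsPB q hq
    have hfd : PySem.Int.floordiv q 10 = q / 10 := by
      show Int.fdiv q 10 = q / 10
      simp [Int.fdiv_eq_ediv]
    rw [Bool.eq_iff_iff, beq_iff_eq, hfd, decide_eq_true_eq]
    omega
  rw [hrhs]
  have hsplit : PySem.List.pyRange 0 1000 1 =
      PySem.List.pyRange 0 (r * 10) 1 ++ PySem.List.pyRange (r * 10) (r * 10 + 10) 1 ++
        PySem.List.pyRange (r * 10 + 10) 1000 1 := by
    rw [PySem.List.pyRange_one_append 0 (r * 10) 1000 (by omega) (by omega),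
      PySem.List.pyRange_one_append (r * 10) (r * 10 + 10) 1000 (by omega) (by omega),
      List.append_assoc]
  have key : (PySem.List.pyRange 0 1000 1).filter
      (fun n => decide (n ∈ pvPrimesB) && decide (r * 10 ≤ n ∧ n < r * 10 + 10)) =
      (PySem.List.pyRange (r * 10) (r * 10 + 10) 1).filter (fun n => decide (n ∈ pvPrimesB)) := by
    rw [hsplit, List.filter_append, List.filter_append]
    have hlo : (PySem.List.pyRange 0 (r * 10) 1).filter
        (fun n => decide (n ∈ pvPrimesB) && decide (r * 10 ≤ n ∧ n < r * 10 + 10)) = [] := by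
      rw [List.filter_eq_nil_iff]
      intro a ha
      have := (PySem.List.mem_pyRange_one.mp ha).2
      simp only [Bool.and_eq_true, decide_eq_true_eq]
      rintro ⟨-, h, -⟩
      omega
    have hhi : (PySem.List.pyRange (r * 10 + 10) 1000 1).filter
        (fun n => decide (n ∈ pvPrimesB) && decide (r * 10 ≤ n ∧ n < r * 10 + 10)) = [] := by
      rw [List.filter_eq_nil_iff]
      intro a ha
      have := (PySem.List.mem_pyRange_one.mp ha).1
      simp only [Bool.and_eq_true, decide_eq_true_eq]
      rintro ⟨-, -, h⟩
      omega
    have hmid : (PySem.List.pyRange (r * 10) (r * 10 + 10) 1).filter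
        (fun n => decide (n ∈ pvPrimesB) && decide (r * 10 ≤ n ∧ n < r * 10 + 10)) =
        (PySem.List.pyRange (r * 10) (r * 10 + 10) 1).filter (fun n => decide (n ∈ pvPrimesB)) := by
      apply List.filter_congr
      intro a ha
      have h1 := PySem.List.mem_pyRange_one.mp ha
      simp [h1.1, h1.2]
    rw [hlo, hhi, hmid, List.append_nil, List.nil_append]
  calc (PySem.List.pyRange (r * 10) (r * 10 + 10) 1).filter (fun n => decide (n ∈ pvPrimesB))
      = (PySem.List.pyRange 0 1000 1).filter
          (fun n => decide (n ∈ pvPrimesB) && decide (r * 10 ≤ n ∧ n < r * 10 + 10)) := key.symm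
    _ = ((PySem.List.pyRange 0 1000 1).filter (fun n => decide (n ∈ pvPrimesB))).filter
          (fun n => decide (r * 10 ≤ n ∧ n < r * 10 + 10)) := by
          rw [List.filter_filter]
          apply List.filter_congr
          intro x _
          exact Bool.and_comm _ _
    _ = pvPrimesB.filter (fun n => decide (r * 10 ≤ n ∧ n < r * 10 + 10)) := by rw [pv_filter0]

def pvSieveInv (j : Nat) (sv : List Bool) : Prop :=
  sv.length = 1000 ∧ ∀ i : Int, 0 ≤ i → i < 1000 → PySem.List.pyGetD sv i false = pvModel j i

theorem pv_sieve_loop : ∀ (n j : Nat) (sv : List Bool), j + n = 30 → pvSieveInv j sv →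
    pvSieveInv 30 ((PySem.List.pyRange (2 + (j : Int)) 32 1).foldl
      (fun sv start =>
        if PySem.List.pyGetD sv start false then
          (PySem.List.pyRange (start * start) 1000 start).foldl
            (fun sv m => PySem.List.pySetD sv m false) sv
        else sv) sv) := by
  intro n
  induction n with
  | zero =>
    intro j sv hj hInv
    have hj30 : j = 30 := by omega
    subst hj30
    rw [PySem.List.pyRange_one_eq_nil (by norm_num)]
    exact hInv
  | succ n ih =>
    intro j sv hj hInv
    have hjle : j ≤ 29 := by omega
    have hlt : (2 + (j : Int)) < 32 := by omega
    rw [PySem.List.pyRange_one_cons hlt, List.foldl_cons]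
    have h2 : (2 + (j : Int)) + 1 = 2 + ((j + 1 : Nat) : Int) := by push_cast; ring
    rw [h2]
    apply ih (j + 1) _ (by omega)
    set k : Int := 2 + (j : Int) with hk
    have hk0 : 0 ≤ k := by omega
    have hk2 : 2 ≤ k := by omega
    have hkk0 : 0 ≤ k * k := mul_nonneg hk0 hk0
    have hguard : PySem.List.pyGetD sv k false = pvStartFlags.getD j false := by
      rw [hInv.2 k hk0 (by omega), pv_flag_ok j (by omega)]
    by_cases hflag : pvStartFlags.getD j false = true
    · rw [if_pos (by rw [hguard]; exact hflag)]
      constructor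
      · rw [pv_setfold_length, hInv.1]
      · intro i hi0 hi1000
        have hbounds : ∀ m ∈ PySem.List.pyRange (k * k) 1000 k, 0 ≤ m ∧ m < (sv.length : Int) := by
          intro m hm
          have := (PySem.List.mem_pyRange_iff_of_pos (by omega) m).mp hm
          rw [hInv.1]
          constructor <;> [omega; exact_mod_cast this.2.1]
        rw [pv_setfold_get false false _ sv hbounds i hi0, hInv.2 i hi0 hi1000,
          pv_model_succ j i, ← hk, hflag]
        by_cases hmem : i ∈ PySem.List.pyRange (k * k) 1000 k
        · have hc := (PySem.List.mem_pyRange_iff_of_pos (by omega) i).mp hmem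
          rw [if_pos hmem]
          simp [hc.1, hc.2.1, hc.2.2]
        · rw [if_neg hmem]
          rw [PySem.List.mem_pyRange_iff_of_pos (by omega) i] at hmem
          push Not at hmem
          by_cases hc1 : k * k ≤ i
          · by_cases hc2 : k ∣ i - k * k
            · exact absurd (hmem hc1 (by omega)) (by simpa using hc2)
            · simp [hc2]
          · simp [hc1]
    · rw [if_neg (by rw [hguard]; simpa using hflag)]
      refine ⟨hInv.1, fun i hi0 hi1000 => ?_⟩
      have hf : pvStartFlags.getD j false = false := by simpa using hflag
      rw [hInv.2 i hi0 hi1000, pv_model_succ j i, hf]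
      simp

theorem pv_sieve_init : pvSieveInv 0
    (PySem.List.pySetD (PySem.List.pySetD (List.replicate 1000 true) 0 false) 1 false) := by
  constructor
  · simp [PySem.List.length_pySetD]
  · intro i hi0 hi1000
    have hl1 : ((PySem.List.pySetD (List.replicate 1000 true) 0 false).length : Int) = 1000 := by
      rw [PySem.List.length_pySetD]; simp
    rw [pv_pyGetD_pySetD _ 1 i false false (by norm_num) (by rw [hl1]; norm_num) hi0,
      pv_pyGetD_pySetD _ 0 i false false (by norm_num) (by simp) hi0,
      pv_getD_replicate 1000 true false i hi0]
    by_cases h1 : i = 1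
    · subst h1; simp [pvModel]
    · by_cases h0 : i = 0
      · subst h0; simp [pvModel]
      · simp [pvModel, h0, h1, hi1000]

-- list mirror of A's sieve (proof-only; the port itself uses arrays)
def pvGenList : List Int :=
  let sieve := List.replicate 1000 true
  let sieve := PySem.List.pySetD sieve 0 false
  let sieve := PySem.List.pySetD sieve 1 false
  let sieve := (PySem.List.pyRange 2 32 1).foldl (fun sv start =>
    if PySem.List.pyGetD sv start false then
      (PySem.List.pyRange (start * start) 1000 start).foldl
        (fun sv m => PySem.List.pySetD sv m false) sv
    else sv) sieve
  (PySem.List.pyRange 100 1000 1).filter (fun num => PySem.List.pyGetD sieve num false)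

theorem pv_G : pvGenList = pvPrimesB := by
  have hloop := pv_sieve_loop 30 0
    (PySem.List.pySetD (PySem.List.pySetD (List.replicate 1000 true) 0 false) 1 false)
    rfl pv_sieve_init
  have h02 : (2 + ((0 : Nat) : Int)) = 2 := by norm_num
  rw [h02] at hloop
  simp only [pvGenList]
  rw [List.filter_congr (fun n hn => hloop.2 n
    (by have := PySem.List.mem_pyRange_one.mp hn; omega)
    (by have := PySem.List.mem_pyRange_one.mp hn; omega))]
  exact pv_model_filter

theorem pv_innerA_eq (p : Int) (hp : p ∈ pvPrimesB) (dpv : Int) (nd : List Int) :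
    List.foldl (fun new_dp digit =>
      if PySem.Set.contains (PySem.Set.ofList pvPrimesB) (PySem.Int.mod p 100 * 10 + digit) then
        PySem.List.pySetD new_dp (PySem.Int.mod p 100 * 10 + digit)
          (PySem.Int.mod (PySem.List.pyGetD new_dp (PySem.Int.mod p 100 * 10 + digit) 0 + dpv) pvMOD)
      else new_dp) nd (PySem.List.pyRange 0 10 1)
    = List.foldl (fun nd q => PySem.List.pySetD nd q
        (PySem.Int.mod (PySem.List.pyGetD nd q 0 + dpv) pvMOD)) nd
        (pvPrimesB.filter (fun q => PySem.Int.floordiv q 10 == PySem.Int.mod p 100)) := by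
  conv_rhs => rw [← pv_inner p hp, ← PySem.List.foldl_if_eq_foldl_filter, List.foldl_map]

-- ===== matrix representation (B-side) =====

def pvMmat : Matrix (Fin 143) (Fin 143) (ZMod pvMODn) := Matrix.of fun i j =>
  if PySem.Int.floordiv (pvPrimesB.getD (j : Nat) 0) 10 = PySem.Int.mod (pvPrimesB.getD (i : Nat) 0) 100
  then 1 else 0

def pvRep (L : List (List Int)) (A : Matrix (Fin 143) (Fin 143) (ZMod pvMODn)) : Prop :=
  L.length = 143 ∧ (∀ r ∈ L, r.length = 143) ∧
  ∀ i j : Fin 143, (((L.getD (i : Nat) []).getD (j : Nat) 0 : Int) : ZMod pvMODn) = A i j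

theorem pv_getD_map {α β : Type} (f : α → β) (l : List α) (i : Nat) (h : i < l.length)
    (d : β) (d' : α) : (l.map f).getD i d = f (l.getD i d') := by
  rw [List.getD_eq_getElem _ _ (by simpa using h), List.getD_eq_getElem _ _ h, List.getElem_map]

theorem pv_getD_range (n i : Nat) (h : i < n) (d : Nat) : (List.range n).getD i d = i := by
  rw [List.getD_eq_getElem _ _ (by simpa using h), List.getElem_range]

theorem pv_sum_range_list {M : Type} [AddCommMonoid M] (f : Nat → M) : ∀ (n : Nat),
    ((List.range n).map f).sum = ∑ k ∈ Finset.range n, f k := by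
  intro n
  induction n with
  | zero => rfl
  | succ n ih => rw [List.range_succ, List.map_append, List.sum_append, Finset.sum_range_succ, ih]; simp

theorem pv_cast_sum (l : List Int) :
    ((l.sum : Int) : ZMod pvMODn) = (l.map (fun x : Int => (x : ZMod pvMODn))).sum := by
  induction l with
  | nil => simp
  | cons a t ih => simp [ih]

theorem pv_sum_getD : ∀ (r : List Int),
    r.sum = ((List.range r.length).map (fun j => r.getD j 0)).sum := by
  intro r
  induction r with
  | nil => rfl
  | cons a t ih =>
    show a + t.sum = _
    rw [List.length_cons, List.range_succ_eq_map, List.map_cons, List.map_map, List.sum_cons]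
    congr 1

theorem pv_zipmap_getD (acc yr : List Int) (x : Int) (j : Nat)
    (hj1 : j < acc.length) (hj2 : j < yr.length) :
    ((acc.zip yr).map (fun ab => ab.1 + x * ab.2)).getD j 0 =
      acc.getD j 0 + x * yr.getD j 0 := by
  have hz : j < (acc.zip yr).length := by
    rw [List.length_zip]; omega
  rw [List.getD_eq_getElem _ _ (by simpa using hz), List.getElem_map, List.getElem_zip,
    List.getD_eq_getElem _ _ hj1, List.getD_eq_getElem _ _ hj2]

theorem pv_combo : ∀ (rowi : List Int) (Ys : List (List Int)), (∀ yr ∈ Ys, yr.length = 143) →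
    ∀ acc : List Int, acc.length = 143 →
    ((rowi.zip Ys).foldl (fun acc xy =>
        (acc.zip xy.2).map (fun ab => ab.1 + xy.1 * ab.2)) acc).length = 143 ∧
    ∀ j : Fin 143,
      ((((rowi.zip Ys).foldl (fun acc xy =>
          (acc.zip xy.2).map (fun ab => ab.1 + xy.1 * ab.2)) acc).getD (j : Nat) 0 : Int) :
            ZMod pvMODn) =
        ((acc.getD (j : Nat) 0 : Int) : ZMod pvMODn) +
        ((rowi.zip Ys).map (fun xy => ((xy.1 : Int) : ZMod pvMODn) *
          ((xy.2.getD (j : Nat) 0 : Int) : ZMod pvMODn))).sum := by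
  intro rowi
  induction rowi with
  | nil =>
    intro Ys _ acc hacc
    exact ⟨by simpa using hacc, fun j => by simp⟩
  | cons x t ih =>
    intro Ys hYs acc hacc
    cases Ys with
    | nil =>
      exact ⟨by simpa using hacc, fun j => by simp⟩
    | cons yr u =>
      have hyr : yr.length = 143 := hYs yr (List.mem_cons_self ..)
      have hstep_len : ((acc.zip yr).map (fun ab => ab.1 + x * ab.2)).length = 143 := by
        rw [List.length_map, List.length_zip]; omega
      obtain ⟨hl, he⟩ := ih u (fun y hy => hYs y (List.mem_cons_of_mem _ hy))
        ((acc.zip yr).map (fun ab => ab.1 + x * ab.2)) hstep_len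
      constructor
      · simpa using hl
      · intro j
        simp only [List.zip_cons_cons, List.foldl_cons, List.map_cons, List.sum_cons]
        rw [he j, pv_zipmap_getD acc yr x (j : Nat) (by omega) (by omega)]
        push_cast
        ring

theorem pv_zip_sum (g : Int × List Int → ZMod pvMODn) : ∀ (l1 : List Int) (l2 : List (List Int)),
    l1.length = l2.length →
    ((l1.zip l2).map g).sum =
      ((List.range l1.length).map (fun k => g (l1.getD k 0, l2.getD k []))).sum := by
  intro l1
  induction l1 with
  | nil => intro l2 _; simp
  | cons a t ih =>
    intro l2 h
    cases l2 with
    | nil => simp at h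
    | cons b u =>
      rw [List.zip_cons_cons, List.map_cons, List.sum_cons, List.length_cons,
        List.range_succ_eq_map, List.map_cons, List.map_map, List.sum_cons,
        ih u (by simpa using h)]
      congr 1

theorem pv_rep_mul {X Y : List (List Int)} {A B : Matrix (Fin 143) (Fin 143) (ZMod pvMODn)}
    (hX : pvRep X A) (hY : pvRep Y B) : pvRep (pvMatmul X Y) (A * B) := by
  obtain ⟨hXl, hXr, hXe⟩ := hX
  obtain ⟨hYl, hYr, hYe⟩ := hY
  have hhead : (Y.headD []).length = 143 := by
    cases Y with
    | nil => simp at hYl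
    | cons y t => exact hYr y (List.mem_cons_self ..)
  have hcombo : ∀ rowi : List Int,
      (((rowi.zip Y).foldl (fun acc xy =>
        (acc.zip xy.2).map (fun ab => ab.1 + xy.1 * ab.2))
          (List.replicate (Y.headD []).length (0 : Int))).length = 143) ∧
      ∀ j : Fin 143,
        ((((rowi.zip Y).foldl (fun acc xy =>
            (acc.zip xy.2).map (fun ab => ab.1 + xy.1 * ab.2))
              (List.replicate (Y.headD []).length (0 : Int))).getD (j : Nat) 0 : Int) :
              ZMod pvMODn) =
          (((List.replicate (Y.headD []).length (0 : Int)).getD (j : Nat) 0 : Int) :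
              ZMod pvMODn) +
          ((rowi.zip Y).map (fun xy => ((xy.1 : Int) : ZMod pvMODn) *
            ((xy.2.getD (j : Nat) 0 : Int) : ZMod pvMODn))).sum :=
    fun rowi => pv_combo rowi Y hYr _ (by rw [List.length_replicate, hhead])
  refine ⟨?_, ?_, ?_⟩
  · simp only [pvMatmul, List.length_map]
    exact hXl
  · intro r hr
    simp only [pvMatmul, List.mem_map] at hr
    obtain ⟨row, -, rfl⟩ := hr
    rw [List.length_map]
    exact (hcombo row).1
  · intro i j
    have hi : (i : Nat) < X.length := by omega
    show (((X.map _).getD (i : Nat) []).getD (j : Nat) 0 : Int) = ((A * B) i j : ZMod pvMODn)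
    rw [pv_getD_map _ X (i : Nat) hi _ []]
    have hrowi : (X.getD (i : Nat) []).length = 143 :=
      hXr _ (by
        rw [List.getD_eq_getElem _ _ hi]
        exact List.getElem_mem hi)
    rw [pv_getD_map (fun a => PySem.Int.mod a pvMOD) _ (j : Nat)
      (by rw [(hcombo (X.getD (i : Nat) [])).1]; omega) 0 0, pv_cast_mod,
      (hcombo (X.getD (i : Nat) [])).2 j,
      List.getD_replicate _ (by rw [hhead]; omega)]
    push_cast
    rw [zero_add, pv_zip_sum _ _ _ (by rw [hrowi, hYl]), hrowi, pv_sum_range_list,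
      ← Fin.sum_univ_eq_sum_range, Matrix.mul_apply]
    apply Finset.sum_congr rfl
    intro k _
    show (((X.getD (i : Nat) []).getD ((k : Nat)) 0 : Int) : ZMod pvMODn) *
        (((Y.getD ((k : Nat)) []).getD ((j : Nat)) 0 : Int) : ZMod pvMODn) = _
    rw [hXe i k, hYe k j]

theorem pv_rep_id : pvRep ((List.range 143).map (fun i => (List.range 143).map
    (fun j => if i = j then (1 : Int) else 0))) 1 := by
  refine ⟨by simp, ?_, ?_⟩
  · intro r hr
    simp only [List.mem_map] at hr
    obtain ⟨x, -, rfl⟩ := hr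
    simp
  · intro i j
    rw [pv_getD_map _ (List.range 143) (i : Nat) (by simp) _ 0,
      pv_getD_range _ _ (by omega) 0,
      pv_getD_map _ (List.range 143) (j : Nat) (by simp) _ 0,
      pv_getD_range _ _ (by omega) 0, Matrix.one_apply]
    by_cases h : i = j
    · subst h; simp
    · have : (i : Nat) ≠ (j : Nat) := fun hh => h (Fin.ext hh)
      simp [this, h]

theorem pv_rep_adj : pvRep (pvPrimesB.map (fun p => pvPrimesB.map (fun q =>
    if PySem.Int.floordiv q 10 == PySem.Int.mod p 100 then (1 : Int) else 0))) pvMmat := by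
  refine ⟨by simp [pv_len_PB], ?_, ?_⟩
  · intro r hr
    simp only [List.mem_map] at hr
    obtain ⟨x, -, rfl⟩ := hr
    simp [pv_len_PB]
  · intro i j
    have hi : (i : Nat) < pvPrimesB.length := by rw [pv_len_PB]; omega
    have hj : (j : Nat) < pvPrimesB.length := by rw [pv_len_PB]; omega
    rw [pv_getD_map _ pvPrimesB (i : Nat) hi _ 0, pv_getD_map _ pvPrimesB (j : Nat) hj _ 0]
    show (((if PySem.Int.floordiv (pvPrimesB.getD (j:Nat) 0) 10 ==
        PySem.Int.mod (pvPrimesB.getD (i:Nat) 0) 100 then (1:Int) else 0) : Int) : ZMod pvMODn) = _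
    rw [pvMmat]
    by_cases h : PySem.Int.floordiv (pvPrimesB.getD (j:Nat) 0) 10 =
        PySem.Int.mod (pvPrimesB.getD (i:Nat) 0) 100
    · simp [h, Matrix.of_apply]
    · simp [h, Matrix.of_apply]

theorem pv_loop_rep : ∀ (n : Nat) (e : Int), e.toNat = n →
    ∀ (R M : List (List Int)) (A B : Matrix (Fin 143) (Fin 143) (ZMod pvMODn)),
    pvRep R A → pvRep M B → pvRep (pvMatpowLoop R M e) (A * B ^ n) := by
  intro n
  induction n using Nat.strong_induction_on with
  | _ n ih =>
    intro e he R M A B hR hM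
    rw [pvMatpowLoop]
    by_cases hpos : 0 < e
    · rw [if_pos hpos]
      have hfd : PySem.Int.floordiv e 2 = e / 2 := by
        show Int.fdiv e 2 = e / 2
        rw [Int.fdiv_eq_ediv]; simp
      have hfm : PySem.Int.mod e 2 = e % 2 := by
        show Int.fmod e 2 = e % 2
        rw [Int.fmod_eq_emod]; simp
      set k : Nat := (e / 2).toNat with hkdef
      have hlt : k < n := by omega
      have hRep' : pvRep (if PySem.Int.mod e 2 == 1 then pvMatmul R M else R)
          (A * B ^ (n % 2)) := by
        rw [hfm]
        by_cases hodd : e % 2 = 1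
        · have : n % 2 = 1 := by omega
          rw [this, pow_one]
          simp only [hodd]
          exact pv_rep_mul hR hM
        · have he2 : e % 2 = 0 := by omega
          have : n % 2 = 0 := by omega
          rw [this, pow_zero, mul_one]
          simp [he2]
          exact hR
      have hrec := ih k hlt (PySem.Int.floordiv e 2) (by rw [hfd]) _ _
        (A * B ^ (n % 2)) (B * B) hRep' (pv_rep_mul hM hM)
      have hkey : (A * B ^ (n % 2)) * (B * B) ^ k = A * B ^ n := by
        rw [← sq, ← pow_mul, mul_assoc, ← pow_add]
        congr 2
        omega
      rwa [hkey] at hrec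
    · rw [if_neg hpos]
      have : n = 0 := by omega
      subst this
      simpa [pow_zero] using hR

-- ===== A's DP step is vector-matrix multiplication =====

def pvVInv (dp : List Int) (w : Fin 143 → ZMod pvMODn) : Prop :=
  dp.length = 1000 ∧
  (∀ i : Fin 143, ((PySem.List.pyGetD dp (pvPrimesB.getD (i : Nat) 0) 0 : Int) : ZMod pvMODn) = w i) ∧
  (∀ n : Int, 0 ≤ n → n < 1000 → n ∉ pvPrimesB → PySem.List.pyGetD dp n 0 = 0) ∧
  (∀ n : Int, 0 ≤ n → 0 ≤ PySem.List.pyGetD dp n 0)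

theorem pv_getD_PB_mem (i : Fin 143) : pvPrimesB.getD (i : Nat) 0 ∈ pvPrimesB := by
  have hi : (i : Nat) < pvPrimesB.length := by rw [pv_len_PB]; omega
  rw [List.getD_eq_getElem _ _ hi]
  exact List.getElem_mem hi

theorem pv_mod_nonneg (x : Int) : 0 ≤ PySem.Int.mod x pvMOD := by
  show 0 ≤ Int.fmod x pvMOD
  rw [Int.fmod_eq_emod]
  have : (0 : Int) ≤ pvMOD := by norm_num [pvMOD]
  simp [this]
  exact Int.emod_nonneg x (by norm_num [pvMOD])

theorem pv_scatter (v : Int) : ∀ (us : List Int), us.Nodup → (∀ q ∈ us, 0 ≤ q ∧ q < 1000) →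
    ∀ (nd : List Int), nd.length = 1000 →
    (us.foldl (fun nd q => PySem.List.pySetD nd q
        (PySem.Int.mod (PySem.List.pyGetD nd q 0 + v) pvMOD)) nd).length = 1000 ∧
    (∀ n : Int, 0 ≤ n →
      (n ∈ us → ((PySem.List.pyGetD (us.foldl (fun nd q => PySem.List.pySetD nd q
          (PySem.Int.mod (PySem.List.pyGetD nd q 0 + v) pvMOD)) nd) n 0 : Int) : ZMod pvMODn) =
          ((PySem.List.pyGetD nd n 0 : Int) : ZMod pvMODn) + (v : ZMod pvMODn)) ∧
      (n ∉ us → PySem.List.pyGetD (us.foldl (fun nd q => PySem.List.pySetD nd q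
          (PySem.Int.mod (PySem.List.pyGetD nd q 0 + v) pvMOD)) nd) n 0 = PySem.List.pyGetD nd n 0)) := by
  intro us
  induction us with
  | nil =>
    intro _ _ nd hlen
    exact ⟨hlen, fun n _ => ⟨fun h => absurd h (List.not_mem_nil), fun _ => rfl⟩⟩
  | cons a t ih =>
    intro hnd hb nd hlen
    have hat : a ∉ t := (List.nodup_cons.mp hnd).1
    have hba := hb a (List.mem_cons_self ..)
    have halen : a < (nd.length : Int) := by omega
    set nd1 := PySem.List.pySetD nd a (PySem.Int.mod (PySem.List.pyGetD nd a 0 + v) pvMOD) with hnd1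
    have hlen1 : nd1.length = 1000 := by rw [hnd1, PySem.List.length_pySetD, hlen]
    have hget1 : ∀ n : Int, 0 ≤ n → PySem.List.pyGetD nd1 n 0 =
        if n = a then PySem.Int.mod (PySem.List.pyGetD nd a 0 + v) pvMOD
        else PySem.List.pyGetD nd n 0 := fun n hn =>
      pv_pyGetD_pySetD nd a n _ 0 hba.1 halen hn
    obtain ⟨hLen, hEnt⟩ := ih (List.nodup_cons.mp hnd).2
      (fun q hq => hb q (List.mem_cons_of_mem _ hq)) nd1 hlen1
    simp only [List.foldl_cons, ← hnd1]
    refine ⟨hLen, fun n hn => ⟨?_, ?_⟩⟩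
    · intro hmem
      rcases List.mem_cons.mp hmem with rfl | hmt
      · rw [(hEnt n hn).2 hat, hget1 n hn, if_pos rfl, pv_cast_mod]
        push_cast
        ring
      · have hna : n ≠ a := fun hh => hat (hh ▸ hmt)
        rw [(hEnt n hn).1 hmt, hget1 n hn, if_neg hna]
    · intro hmem
      have hna : n ≠ a := fun hh => hmem (hh ▸ List.mem_cons_self ..)
      have hnt : n ∉ t := fun hh => hmem (List.mem_cons_of_mem _ hh)
      rw [(hEnt n hn).2 hnt, hget1 n hn, if_neg hna]

theorem pv_PB_eq_map : pvPrimesB = (List.finRange 143).map (fun i : Fin 143 => pvPrimesB.getD (i : Nat) 0) := by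
  decide

theorem pv_scatter_nonneg (v : Int) : ∀ (us : List Int), us.Nodup →
    (∀ q ∈ us, 0 ≤ q ∧ q < 1000) → ∀ (nd : List Int), nd.length = 1000 →
    (∀ n : Int, 0 ≤ n → 0 ≤ PySem.List.pyGetD nd n 0) → ∀ n : Int, 0 ≤ n →
    0 ≤ PySem.List.pyGetD (us.foldl (fun nd q => PySem.List.pySetD nd q
        (PySem.Int.mod (PySem.List.pyGetD nd q 0 + v) pvMOD)) nd) n 0 := by
  intro us
  induction us with
  | nil => intro _ _ nd _ hpos n hn; exact hpos n hn
  | cons a t ih =>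
    intro hnd hb nd hlen hpos n hn
    have hba := hb a (List.mem_cons_self ..)
    simp only [List.foldl_cons]
    apply ih (List.nodup_cons.mp hnd).2 (fun q hq => hb q (List.mem_cons_of_mem _ hq))
    · rw [PySem.List.length_pySetD, hlen]
    · intro m hm
      rw [pv_pyGetD_pySetD nd a m _ 0 hba.1 (by omega) hm]
      by_cases hma : m = a
      · rw [if_pos hma]; exact pv_mod_nonneg _
      · rw [if_neg hma]; exact hpos m hm
    · exact hn

-- one index step of the (filtered, rewritten) outer loop of A
theorem pv_idx_step (dp : List Int) (w : Fin 143 → ZMod pvMODn) (hdp : pvVInv dp w)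
    (i : Fin 143) (nd : List Int) (u : Fin 143 → ZMod pvMODn) (hnd : pvVInv nd u) :
    pvVInv (if PySem.List.pyGetD dp (pvPrimesB.getD (i : Nat) 0) 0 > 0 then
        (pvPrimesB.filter (fun q => PySem.Int.floordiv q 10 ==
            PySem.Int.mod (pvPrimesB.getD (i : Nat) 0) 100)).foldl
          (fun nd q => PySem.List.pySetD nd q
            (PySem.Int.mod (PySem.List.pyGetD nd q 0 +
              PySem.List.pyGetD dp (pvPrimesB.getD (i : Nat) 0) 0) pvMOD)) nd
      else nd)
      (fun j => u j + w i * pvMmat i j) := by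
  obtain ⟨hlen, hent, hzero, hpos⟩ := hnd
  set p := pvPrimesB.getD (i : Nat) 0 with hpdef
  have hpmem : p ∈ pvPrimesB := pv_getD_PB_mem i
  have hpb := pv_boundsPB p hpmem
  set us := pvPrimesB.filter (fun q => PySem.Int.floordiv q 10 == PySem.Int.mod p 100) with husdef
  have husnd : us.Nodup := pv_nodupPB.filter _
  have husb : ∀ q ∈ us, 0 ≤ q ∧ q < 1000 := by
    intro q hq
    have := pv_boundsPB q (List.mem_of_mem_filter hq)
    omega
  by_cases hg : PySem.List.pyGetD dp p 0 > 0
  · rw [if_pos hg]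
    obtain ⟨hLen, hEnt⟩ := pv_scatter (PySem.List.pyGetD dp p 0) us husnd husb nd hlen
    refine ⟨hLen, ?_, ?_, ?_⟩
    · intro j
      set q := pvPrimesB.getD (j : Nat) 0 with hqdef
      have hqmem : q ∈ pvPrimesB := pv_getD_PB_mem j
      have hq0 : (0 : Int) ≤ q := by have := pv_boundsPB q hqmem; omega
      have hM : pvMmat i j = if PySem.Int.floordiv q 10 = PySem.Int.mod p 100 then 1 else 0 := rfl
      show ((PySem.List.pyGetD (us.foldl (fun nd q => PySem.List.pySetD nd q
          (PySem.Int.mod (PySem.List.pyGetD nd q 0 + PySem.List.pyGetD dp p 0) pvMOD)) nd)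
          q 0 : Int) : ZMod pvMODn) = u j + w i * pvMmat i j
      by_cases hc : PySem.Int.floordiv q 10 = PySem.Int.mod p 100
      · have hqus : q ∈ us := by
          rw [husdef, List.mem_filter]
          refine ⟨hqmem, ?_⟩
          simp only [beq_iff_eq]
          exact hc
        rw [(hEnt q hq0).1 hqus, hent j, hdp.2.1 i, hM, if_pos hc, mul_one]
      · have hqus : q ∉ us := by
          rw [husdef, List.mem_filter]
          rintro ⟨-, hcc⟩
          simp only [beq_iff_eq] at hcc
          exact hc hcc
        rw [(hEnt q hq0).2 hqus, hent j, hM, if_neg hc, mul_zero, add_zero]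
    · intro n hn0 hn1000 hnp
      have hnus : n ∉ us := fun hh => hnp (List.mem_of_mem_filter hh)
      rw [(hEnt n hn0).2 hnus]
      exact hzero n hn0 hn1000 hnp
    · intro n hn0
      by_cases hnus : n ∈ us
      · have := (hEnt n hn0).1 hnus
        -- the stored value is a result of PySem.Int.mod, hence nonneg; recompute directly
        -- entries of the folded list at members are fmod values; show nonneg via fold structure
        -- simpler: any pyGetD of the folded list is either an original entry or an fmod value
        exact pv_scatter_nonneg (PySem.List.pyGetD dp p 0) us husnd husb nd hlen hpos n hn0
      · rw [(hEnt n hn0).2 hnus]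
        exact hpos n hn0
  · rw [if_neg hg]
    have hp0 : PySem.List.pyGetD dp p 0 = 0 := by
      have := hdp.2.2.2 p (by omega)
      omega
    have hwi : w i = 0 := by
      rw [← hdp.2.1 i, ← hpdef, hp0]
      simp
    refine ⟨hlen, fun j => ?_, hzero, hpos⟩
    show ((PySem.List.pyGetD nd (pvPrimesB.getD (j : Nat) 0) 0 : Int) : ZMod pvMODn) =
      u j + w i * pvMmat i j
    rw [hent j, hwi, zero_mul, add_zero]

theorem pv_stepA (dp : List Int) (w : Fin 143 → ZMod pvMODn) (hdp : pvVInv dp w) :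
    pvVInv ((PySem.List.pyRange 100 1000 1).foldl (fun new_dp num =>
      if PySem.List.pyGetD dp num 0 > 0 then
        (PySem.List.pyRange 0 10 1).foldl (fun new_dp digit =>
          if PySem.Set.contains (PySem.Set.ofList pvPrimesB) (PySem.Int.mod num 100 * 10 + digit) then
            PySem.List.pySetD new_dp (PySem.Int.mod num 100 * 10 + digit)
              (PySem.Int.mod (PySem.List.pyGetD new_dp (PySem.Int.mod num 100 * 10 + digit) 0 +
                PySem.List.pyGetD dp num 0) pvMOD)
          else new_dp) new_dp
      else new_dp) (List.replicate 1000 (0 : Int)))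
    (Matrix.vecMul w pvMmat) := by
  rw [pv_foldl_filter (fun n => decide (n ∈ pvPrimesB)) _ (PySem.List.pyRange 100 1000 1)
    (fun x hx hqf acc => by
      have hxPB : x ∉ pvPrimesB := by simpa using hqf
      have hbx := PySem.List.mem_pyRange_one.mp hx
      have hz : PySem.List.pyGetD dp x 0 = 0 := hdp.2.2.1 x (by omega) (by omega) hxPB
      simp only [hz]
      norm_num)
    (List.replicate 1000 (0 : Int)), pv_filter100]
  rw [PySem.List.foldl_congr_mem' pvPrimesB _
    (fun nd p =>
      if PySem.List.pyGetD dp p 0 > 0 then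
        (pvPrimesB.filter (fun q => PySem.Int.floordiv q 10 == PySem.Int.mod p 100)).foldl
          (fun nd q => PySem.List.pySetD nd q
            (PySem.Int.mod (PySem.List.pyGetD nd q 0 + PySem.List.pyGetD dp p 0) pvMOD)) nd
      else nd)
    (List.replicate 1000 (0 : Int))
    (by
      intro p hp acc
      by_cases hg : PySem.List.pyGetD dp p 0 > 0
      · simp only [if_pos hg]
        exact pv_innerA_eq p hp _ acc
      · simp only [if_neg hg])]
  conv_lhs => rw [pv_PB_eq_map]
  rw [List.foldl_map]
  have hinit : pvVInv (List.replicate 1000 (0 : Int)) (fun _ => 0) := by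
    refine ⟨by simp, ?_, ?_, ?_⟩
    · intro i
      have hpmem := pv_getD_PB_mem i
      have hb := pv_boundsPB _ hpmem
      rw [pv_getD_replicate 1000 (0 : Int) 0 _ (by omega), if_pos (by omega)]
      simp
    · intro n h0 h1000 _
      rw [pv_getD_replicate 1000 (0 : Int) 0 n h0, if_pos (by exact_mod_cast h1000)]
    · intro n h0
      rw [pv_getD_replicate 1000 (0 : Int) 0 n h0]
      split_ifs <;> norm_num
  have hfold : ∀ (l : List (Fin 143)) (nd : List Int) (u : Fin 143 → ZMod pvMODn), pvVInv nd u →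
      pvVInv (l.foldl (fun nd i =>
        if PySem.List.pyGetD dp (pvPrimesB.getD (i : Nat) 0) 0 > 0 then
          (pvPrimesB.filter (fun q => PySem.Int.floordiv q 10 ==
              PySem.Int.mod (pvPrimesB.getD (i : Nat) 0) 100)).foldl
            (fun nd q => PySem.List.pySetD nd q
              (PySem.Int.mod (PySem.List.pyGetD nd q 0 +
                PySem.List.pyGetD dp (pvPrimesB.getD (i : Nat) 0) 0) pvMOD)) nd
        else nd) nd)
      (fun j => u j + (l.map (fun i => w i * pvMmat i j)).sum) := by
    intro l
    induction l with
    | nil =>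
      intro nd u hnd
      exact ⟨hnd.1, fun j => (hnd.2.1 j).trans (by simp), hnd.2.2.1, hnd.2.2.2⟩
    | cons i t ihl =>
      intro nd u hnd
      have h1 := pv_idx_step dp w hdp i nd u hnd
      have h2 := ihl _ _ h1
      refine ⟨h2.1, fun j => (h2.2.1 j).trans (by simp [List.map_cons]; ring), h2.2.2.1, h2.2.2.2⟩
  have hres := hfold (List.finRange 143) (List.replicate 1000 (0 : Int)) (fun _ => 0) hinit
  refine ⟨hres.1, fun j => (hres.2.1 j).trans ?_, hres.2.2.1, hres.2.2.2⟩
  show (0 : ZMod pvMODn) + ((List.finRange 143).map (fun i => w i * pvMmat i j)).sum =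
    Matrix.vecMul w pvMmat j
  rw [zero_add, ← Fin.sum_univ_def (fun i => w i * pvMmat i j)]
  simp [Matrix.vecMul, dotProduct]

theorem pv_fold_vecMul {α : Type} : ∀ (l : List α) (w : Fin 143 → ZMod pvMODn),
    l.foldl (fun w _ => Matrix.vecMul w pvMmat) w = Matrix.vecMul w (pvMmat ^ l.length) := by
  intro l
  induction l with
  | nil =>
    intro w
    simp [Matrix.vecMul_one]
  | cons a t ih =>
    intro w
    rw [List.foldl_cons, ih, Matrix.vecMul_vecMul, List.length_cons, pow_succ']

-- list mirror of the whole port A (proof-only)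
def pvAListA (N : Int) : Int :=
  let primes := pvPrimesB
  let prime_set : PySem.Set Int := PySem.Set.ofList primes
  let dp : List Int := primes.foldl (fun dp p => PySem.List.pySetD dp p 1)
    (List.replicate 1000 (0 : Int))
  let dp := (PySem.List.pyRange 3 N 1).foldl (fun dp _ =>
    (PySem.List.pyRange 100 1000 1).foldl (fun new_dp num =>
      if PySem.List.pyGetD dp num 0 > 0 then
        (PySem.List.pyRange 0 10 1).foldl (fun new_dp digit =>
          let new_num := PySem.Int.mod num 100 * 10 + digit
          if PySem.Set.contains prime_set new_num then
            PySem.List.pySetD new_dp new_num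
              (PySem.Int.mod (PySem.List.pyGetD new_dp new_num 0 + PySem.List.pyGetD dp num 0) pvMOD)
          else new_dp) new_dp
      else new_dp) (List.replicate 1000 (0 : Int))) dp
  PySem.Int.mod dp.sum pvMOD

-- simulation: the Array-based port A equals its list mirror
theorem pv_fmod_nonneg100 (x : Int) : 0 ≤ PySem.Int.mod x 100 := by
  show 0 ≤ Int.fmod x 100
  rw [Int.fmod_eq_emod]
  simp
  exact Int.emod_nonneg x (by norm_num)

theorem pv_gen_sim : generate_three_digit_primes = pvGenList := by
  simp only [generate_three_digit_primes, pvGenList]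
  have hstart : (pvArrSet (pvArrSet (Array.replicate 1000 true) 0 false) 1 false).toList =
      PySem.List.pySetD (PySem.List.pySetD (List.replicate 1000 true) 0 false) 1 false := by
    rw [pvArrSet_toList _ _ _ (by norm_num), pvArrSet_toList _ _ _ (by norm_num),
      Array.toList_replicate]
  have hsieve : ((PySem.List.pyRange 2 32 1).foldl (fun sv start =>
      if pvArrGet sv start false then
        (PySem.List.pyRange (start * start) 1000 start).foldl
          (fun sv m => pvArrSet sv m false) sv
      else sv) (pvArrSet (pvArrSet (Array.replicate 1000 true) 0 false) 1 false)).toList =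
      (PySem.List.pyRange 2 32 1).foldl (fun sv start =>
      if PySem.List.pyGetD sv start false then
        (PySem.List.pyRange (start * start) 1000 start).foldl
          (fun sv m => PySem.List.pySetD sv m false) sv
      else sv) (PySem.List.pySetD (PySem.List.pySetD (List.replicate 1000 true) 0 false) 1 false) := by
    rw [← hstart]
    apply pv_fold_sim
    intro start hst sv
    have hs2 : (2 : Int) ≤ start := (PySem.List.mem_pyRange_one.mp hst).1
    rw [pvArrGet_toList sv start false (by omega)]
    by_cases hgd : PySem.List.pyGetD sv.toList start false
    · rw [if_pos hgd, if_pos hgd]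
      apply pv_fold_sim
      intro m hm sv'
      have := (PySem.List.mem_pyRange_iff_of_pos (by omega : (0:Int) < start) m).mp hm
      exact pvArrSet_toList sv' m false (by nlinarith [this.1])
    · rw [if_neg hgd, if_neg hgd]
  apply List.filter_congr
  intro num hnum
  have h0 : (0 : Int) ≤ num := by
    have := (PySem.List.mem_pyRange_one.mp hnum).1
    omega
  rw [pvArrGet_toList _ num false h0, hsieve]

theorem pv_A_sim (N : Int) : count_triprime_numbers N = pvAListA N := by
  simp only [count_triprime_numbers, pvAListA]
  rw [pv_gen_sim, pv_G]
  have hb0 : ∀ p ∈ pvPrimesB, (0 : Int) ≤ p := fun p hp => by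
    have := pv_boundsPB p hp; omega
  have hinit : (pvPrimesB.foldl (fun dp p => pvArrSet dp p 1)
      (Array.replicate 1000 (0 : Int))).toList =
      pvPrimesB.foldl (fun dp p => PySem.List.pySetD dp p 1) (List.replicate 1000 (0 : Int)) := by
    rw [pv_fold_sim pvPrimesB (fun dp p => pvArrSet dp p 1)
      (fun dp p => PySem.List.pySetD dp p 1)
      (fun p hp sv => pvArrSet_toList sv p 1 (hb0 p hp)) (Array.replicate 1000 (0 : Int)),
      Array.toList_replicate]
  have hmain : ((PySem.List.pyRange 3 N 1).foldl (fun dp _ =>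
      (PySem.List.pyRange 100 1000 1).foldl (fun new_dp num =>
        if pvArrGet dp num 0 > 0 then
          (PySem.List.pyRange 0 10 1).foldl (fun new_dp digit =>
            if PySem.Set.contains (PySem.Set.ofList pvPrimesB)
                (PySem.Int.mod num 100 * 10 + digit) then
              pvArrSet new_dp (PySem.Int.mod num 100 * 10 + digit)
                (PySem.Int.mod (pvArrGet new_dp (PySem.Int.mod num 100 * 10 + digit) 0 +
                  pvArrGet dp num 0) pvMOD)
            else new_dp) new_dp
        else new_dp) (Array.replicate 1000 (0 : Int)))
      (pvPrimesB.foldl (fun dp p => pvArrSet dp p 1) (Array.replicate 1000 (0 : Int)))).toList =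
      (PySem.List.pyRange 3 N 1).foldl (fun dp _ =>
      (PySem.List.pyRange 100 1000 1).foldl (fun new_dp num =>
        if PySem.List.pyGetD dp num 0 > 0 then
          (PySem.List.pyRange 0 10 1).foldl (fun new_dp digit =>
            if PySem.Set.contains (PySem.Set.ofList pvPrimesB)
                (PySem.Int.mod num 100 * 10 + digit) then
              PySem.List.pySetD new_dp (PySem.Int.mod num 100 * 10 + digit)
                (PySem.Int.mod (PySem.List.pyGetD new_dp (PySem.Int.mod num 100 * 10 + digit) 0 +
                  PySem.List.pyGetD dp num 0) pvMOD)
            else new_dp) new_dp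
        else new_dp) (List.replicate 1000 (0 : Int)))
      (pvPrimesB.foldl (fun dp p => PySem.List.pySetD dp p 1) (List.replicate 1000 (0 : Int))) := by
    rw [← hinit]
    apply pv_fold_sim
    intro _ _ dp
    conv_rhs => rw [show (List.replicate 1000 (0 : Int)) =
      (Array.replicate 1000 (0 : Int)).toList from Array.toList_replicate.symm]
    apply pv_fold_sim
    intro num hnum nd
    have h0num : (0 : Int) ≤ num := by
      have := (PySem.List.mem_pyRange_one.mp hnum).1
      omega
    rw [pvArrGet_toList dp num 0 h0num]
    by_cases hg : PySem.List.pyGetD dp.toList num 0 > 0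
    · rw [if_pos hg, if_pos hg]
      apply pv_fold_sim
      intro digit hdig nd'
      have h0d : (0 : Int) ≤ digit := (PySem.List.mem_pyRange_one.mp hdig).1
      have h0nn : (0 : Int) ≤ PySem.Int.mod num 100 * 10 + digit := by
        have := pv_fmod_nonneg100 num
        omega
      by_cases hc : PySem.Set.contains (PySem.Set.ofList pvPrimesB)
          (PySem.Int.mod num 100 * 10 + digit)
      · rw [if_pos hc, if_pos hc, pvArrSet_toList _ _ _ h0nn,
          pvArrGet_toList nd' _ 0 h0nn]
      · rw [if_neg hc, if_neg hc]
    · rw [if_neg hg, if_neg hg]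
  rw [← Array.foldl_toList, hmain, ← List.sum_eq_foldl]

theorem pv_sumA (dp : List Int) (w : Fin 143 → ZMod pvMODn) (h : pvVInv dp w) :
    ((dp.sum : Int) : ZMod pvMODn) = ∑ j : Fin 143, w j := by
  obtain ⟨hflen, hfent, hfzero, -⟩ := h
  have h1 : dp.sum = ((PySem.List.pyRange 0 1000 1).map
      (fun j => PySem.List.pyGetD dp j 0)).sum := by
    conv_lhs => rw [← PySem.List.map_pyGetD_pyRange_zero' dp 0]
    rw [hflen]
    norm_num
  rw [h1, pv_sum_filter (fun j => PySem.List.pyGetD dp j 0) (fun n => decide (n ∈ pvPrimesB))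
      (PySem.List.pyRange 0 1000 1) (fun x hx hq => by
        have hbx := PySem.List.mem_pyRange_one.mp hx
        exact hfzero x (by omega) (by omega) (by simpa using hq)),
    pv_filter0]
  conv_lhs => rw [pv_PB_eq_map, List.map_map]
  rw [pv_cast_sum, List.map_map, Fin.sum_univ_def]
  congr 1
  apply List.map_congr_left
  intro i _
  show ((PySem.List.pyGetD dp (pvPrimesB.getD (i : Nat) 0) 0 : Int) : ZMod pvMODn) = _
  exact hfent i

theorem pv_sumB (P : List (List Int)) (A : Matrix (Fin 143) (Fin 143) (ZMod pvMODn))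
    (h : pvRep P A) :
    (((P.map List.sum).sum : Int) : ZMod pvMODn) = ∑ i : Fin 143, ∑ j : Fin 143, A i j := by
  obtain ⟨hPl, hPr, hPe⟩ := h
  rw [pv_sum_getD (P.map List.sum), List.length_map, hPl,
    pv_cast_sum, List.map_map, pv_sum_range_list, ← Fin.sum_univ_eq_sum_range]
  apply Finset.sum_congr rfl
  intro i _
  show (((P.map List.sum).getD (i : Nat) 0 : Int) : ZMod pvMODn) = ∑ j : Fin 143, A i j
  rw [pv_getD_map List.sum P (i : Nat) (by omega) 0 []]
  have hrowlen : (P.getD (i : Nat) []).length = 143 :=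
    hPr _ (by
      rw [List.getD_eq_getElem _ _ (by omega)]
      exact List.getElem_mem (by omega))
  rw [pv_sum_getD (P.getD (i : Nat) []), hrowlen,
    pv_cast_sum, List.map_map, pv_sum_range_list, ← Fin.sum_univ_eq_sum_range]
  exact Finset.sum_congr rfl (fun j _ => hPe i j)

theorem pv_total (e : Nat) :
    (∑ j : Fin 143, Matrix.vecMul (fun _ => (1 : ZMod pvMODn)) (pvMmat ^ e) j) =
    ∑ i : Fin 143, ∑ j : Fin 143, (pvMmat ^ e) i j := by
  rw [Finset.sum_comm]
  apply Finset.sum_congr rfl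
  intro j _
  simp [Matrix.vecMul, dotProduct]

-- ===== VERDICT (by name: the statement is the Claim_ definition above) =====
theorem count_triprime_numbers_spec : Claim_equal_count_triprime_numbers := by
  intro N _
  unfold Spec_count_triprime_numbers
  rw [pv_A_sim N]
  simp only [pvAListA, count_triprime_numbers_alt]
  -- A side: the DP invariant after the loop
  have hb : ∀ m ∈ pvPrimesB, 0 ≤ m ∧ m < ((List.replicate 1000 (0 : Int)).length : Int) := by
    intro m hm
    have := pv_boundsPB m hm
    simp
    omega
  have hinit : pvVInv
      (pvPrimesB.foldl (fun dp p => PySem.List.pySetD dp p 1) (List.replicate 1000 (0 : Int)))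
      (fun _ => 1) := by
    refine ⟨by rw [pv_setfold_length]; simp, ?_, ?_, ?_⟩
    · intro i
      have hpmem := pv_getD_PB_mem i
      have hpb := pv_boundsPB _ hpmem
      rw [pv_setfold_get 1 0 pvPrimesB _ hb _ (by omega), if_pos hpmem]
      simp
    · intro n h0 h1000 hnp
      rw [pv_setfold_get 1 0 pvPrimesB _ hb n h0, if_neg hnp,
        pv_getD_replicate 1000 (0 : Int) 0 n h0, if_pos (by exact_mod_cast h1000)]
    · intro n h0
      rw [pv_setfold_get 1 0 pvPrimesB _ hb n h0]
      split_ifs with h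
      · norm_num
      · rw [pv_getD_replicate 1000 (0 : Int) 0 n h0]; split_ifs <;> norm_num
  have hloop := pv_foldl_rel pvVInv _ (fun w _ => Matrix.vecMul w pvMmat)
    (PySem.List.pyRange 3 N 1) (fun x _ s t hst => pv_stepA s t hst) _ _ hinit
  rw [pv_fold_vecMul] at hloop
  have hlenR : (PySem.List.pyRange 3 N 1).length = (N - 3).toNat := by
    rw [PySem.List.length_pyRange_one]
  rw [hlenR] at hloop
  -- B side
  have hRid : pvRep ((List.range pvPrimesB.length).map (fun i => (List.range pvPrimesB.length).map
      (fun j => if i = j then (1 : Int) else 0))) 1 := by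
    rw [pv_len_PB]
    exact pv_rep_id
  have hrepP := pv_loop_rep (N - 3).toNat (N - 3) rfl _ _ 1 pvMmat hRid pv_rep_adj
  rw [one_mul] at hrepP
  -- compare the two results modulo pvMOD
  apply pv_mod_eq_of_cast
  exact (pv_sumA _ _ hloop).trans (((pv_total (N - 3).toNat).trans
    (pv_sumB _ _ hrepP).symm))
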